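-- pv_equiv track=rewrite | github.com/JanBartoszek/ERP | crm/crm.py | get_longest_name_id
-- ===== SOURCE A (Python) =====
-- def get_longest_name_id(table):
--
--     # your code
--     longest_name_entries = [['id', 'a']]
--     for item in table:
--         if len(item[1]) > len(longest_name_entries[0][1]):
--             longest_name_entries = []
--             longest_name_entries.append(item)
--         elif len(item[1]) == len(longest_name_entries[0][1]):
--             longest_name_entries.append(item)
--
--     longest_names = []
--     for item in longest_name_entries:
--         longest_names.append(item[1])
--
--     longest_name = min(longest_names)
--
--     for item in longest_name_entries:
--         if item[1] == longest_name:
--             result = item[0]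
--
--     return result
-- ===== SOURCE B (Python) =====
-- def get_longest_name_id(table):
--     best = ['id', 'a']
--     for item in table:
--         name = item[1]
--         if len(name) > len(best[1]):
--             best = item
--         elif len(name) == len(best[1]) and name <= best[1]:
--             best = item
--     return best[0]
-- ===== Notes on version B (the rewrite author's own statement) =====
-- stated objective: simpler
-- what changed: Replaced A's four phases (collect all max-length candidate rows into a list, extract their names, take min, rescan candidates for the last matching id) with a single pass that keeps one running best row, using <= on equal lengths to retain the last occurrence of the minimal name; no candidate list is materialized.
import Mathlib
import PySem

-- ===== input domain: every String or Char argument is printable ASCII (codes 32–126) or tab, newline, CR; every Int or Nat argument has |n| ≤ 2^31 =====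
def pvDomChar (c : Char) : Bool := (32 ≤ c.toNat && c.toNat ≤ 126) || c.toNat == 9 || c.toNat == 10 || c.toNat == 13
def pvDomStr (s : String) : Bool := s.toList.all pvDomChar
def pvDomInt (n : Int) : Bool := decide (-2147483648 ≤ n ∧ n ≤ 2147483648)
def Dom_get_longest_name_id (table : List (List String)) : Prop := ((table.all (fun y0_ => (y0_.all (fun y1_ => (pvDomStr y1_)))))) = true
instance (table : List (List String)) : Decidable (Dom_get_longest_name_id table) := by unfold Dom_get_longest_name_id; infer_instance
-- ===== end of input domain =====

-- B fuses A's collect-candidates / extract-names / min / rescan phases into one running-best pass (objective: simpler).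

-- ===== PORT A =====
def get_longest_name_id (table : List (List String)) : String :=
  -- longest_name_entries = [['id','a']]; for item in table: …
  let entries := table.foldl (fun es item =>
    if (PySem.List.pyGetD item 1 "").length > (PySem.List.pyGetD (PySem.List.pyGetD es 0 []) 1 "").length then
      [item]
    else if (PySem.List.pyGetD item 1 "").length = (PySem.List.pyGetD (PySem.List.pyGetD es 0 []) 1 "").length then
      es ++ [item]
    else es) [["id", "a"]]
  -- longest_names = []; for item in entries: append item[1]
  let names := entries.foldl (fun acc item => acc ++ [PySem.List.pyGetD item 1 ""]) []
  -- longest_name = min(longest_names)   (entries is never empty, so min exists)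
  let longest_name := (PySem.List.min? names (fun x => x)).getD ""
  -- result assigned in the last loop whenever item[1] == longest_name (always happens; none = unassigned)
  let result := entries.foldl (fun r item =>
    if (PySem.List.pyGetD item 1 "") == longest_name then some (PySem.List.pyGetD item 0 "") else r)
    (none : Option String)
  result.getD ""

-- ===== PORT B =====
def get_longest_name_id_alt (table : List (List String)) : String :=
  let best := table.foldl (fun best item =>
    let name := PySem.List.pyGetD item 1 ""
    if name.length > (PySem.List.pyGetD best 1 "").length then item
    else if name.length = (PySem.List.pyGetD best 1 "").length ∧ name ≤ PySem.List.pyGetD best 1 "" then item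
    else best) ["id", "a"]
  PySem.List.pyGetD best 0 ""

-- ===== PRECONDITION & SPEC =====
-- Pre_ : every row has at least 2 entries; on a shorter row Python's item[1] raises IndexError (in both A and B).
def Pre_get_longest_name_id (table : List (List String)) : Prop :=
  ∀ row ∈ table, 2 ≤ row.length
instance (table : List (List String)) : Decidable (Pre_get_longest_name_id table) := by
  unfold Pre_get_longest_name_id; infer_instance
def pvWitness_get_longest_name_id : List (List String) := [["1", "alice"], ["2", "bob"]]

def Spec_get_longest_name_id (table : List (List String)) (out : String) : Prop := out = get_longest_name_id_alt table
instance (table : List (List String)) (out : String) : Decidable (Spec_get_longest_name_id table out) := by unfold Spec_get_longest_name_id; infer_instance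

-- ===== CLAIM (what is proved, stated in full; the proofs are below) =====
def Claim_equal_get_longest_name_id : Prop := ∀ (table : List (List String)), Dom_get_longest_name_id table → Pre_get_longest_name_id table → Spec_get_longest_name_id table (get_longest_name_id table)

-- ===== LEMMAS AND PROOFS =====

-- name and id of a row, as the ports read them
def pvNm (e : List String) : String := PySem.List.pyGetD e 1 ""
def pvId (e : List String) : String := PySem.List.pyGetD e 0 ""

-- A's last scan: last id among rows of es whose name equals n
def pvLast (es : List (List String)) (n : String) : Option String :=
  es.foldl (fun r item => if pvNm item == n then some (pvId item) else r) none

-- the loop bodies of the two ports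
def pvStepA (es : List (List String)) (item : List String) : List (List String) :=
  if (pvNm item).length > (pvNm (PySem.List.pyGetD es 0 [])).length then [item]
  else if (pvNm item).length = (pvNm (PySem.List.pyGetD es 0 [])).length then es ++ [item]
  else es

def pvStepB (best : List String) (item : List String) : List String :=
  if (pvNm item).length > (pvNm best).length then item
  else if (pvNm item).length = (pvNm best).length ∧ pvNm item ≤ pvNm best then item
  else best

-- the coupling invariant between A's candidate list and B's running best
def pvInv (es : List (List String)) (best : List String) : Prop :=
  es ≠ [] ∧
  (∀ e ∈ es, (pvNm e).length = (pvNm best).length) ∧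
  PySem.List.min? (es.map pvNm) (fun x => x) = some (pvNm best) ∧
  pvLast es (pvNm best) = some (pvId best)

theorem pvLast_append (es : List (List String)) (item : List String) (n : String) :
    pvLast (es ++ [item]) n = if pvNm item == n then some (pvId item) else pvLast es n := by
  simp [pvLast, List.foldl_append]

theorem pvMin_id_cons (x : String) (t : List String) :
    PySem.List.min? (x :: t) (fun y => y) = some (t.foldl min x) :=
  PySem.List.min?_id_cons x t

theorem pvMin_append (x : String) (t : List String) (n : String) :
    PySem.List.min? (x :: t ++ [n]) (fun y => y) = some (min (t.foldl min x) n) := by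
  rw [show x :: t ++ [n] = x :: (t ++ [n]) from rfl, pvMin_id_cons]
  simp [List.foldl_append]

theorem pvHead_of_ne (es : List (List String)) (h : es ≠ []) :
    PySem.List.pyGetD es 0 [] ∈ es := by
  cases es with
  | nil => exact absurd rfl h
  | cons a t => simp [PySem.List.pyGetD_zero_cons]

theorem pvInv_step (es : List (List String)) (best : List String) (item : List String)
    (h : pvInv es best) : pvInv (pvStepA es item) (pvStepB best item) := by
  obtain ⟨hne, hlen, hmin, hlast⟩ := h
  have hhead : (pvNm (PySem.List.pyGetD es 0 [])).length = (pvNm best).length :=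
    hlen _ (pvHead_of_ne es hne)
  unfold pvStepA pvStepB
  rw [hhead]
  by_cases hgt : (pvNm item).length > (pvNm best).length
  · simp only [if_pos hgt]
    refine ⟨by simp, by simp, ?_, ?_⟩
    · rw [show List.map pvNm [item] = [pvNm item] from rfl, pvMin_id_cons]; rfl
    · simp [pvLast]
  · simp only [if_neg hgt]
    by_cases heq : (pvNm item).length = (pvNm best).length
    · simp only [if_pos heq]
      -- es = x :: t for the min? lemma
      obtain ⟨x, t, rfl⟩ : ∃ x t, es = x :: t := by
        cases es with
        | nil => exact absurd rfl hne
        | cons a t => exact ⟨a, t, rfl⟩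
      have hmin' : (t.map pvNm).foldl min (pvNm x) = pvNm best := by
        rw [List.map_cons, pvMin_id_cons] at hmin
        exact Option.some.inj hmin
      by_cases hle : pvNm item ≤ pvNm best
      · simp only [if_pos (And.intro heq hle)]
        refine ⟨by simp, ?_, ?_, ?_⟩
        · intro e he
          rcases List.mem_append.mp he with he | he
          · rw [hlen e he, heq]
          · simp at he; subst he; rfl
        · have : (x :: t ++ [item]).map pvNm = pvNm x :: (t.map pvNm ++ [pvNm item]) := by simp
          rw [this]
          rw [show pvNm x :: (t.map pvNm ++ [pvNm item]) = (pvNm x :: t.map pvNm) ++ [pvNm item] from rfl]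
          rw [pvMin_append, hmin']
          rw [min_eq_right hle]
        · rw [pvLast_append]
          simp
      · have hlt : pvNm best < pvNm item := lt_of_not_ge hle
        rw [if_neg (show ¬((pvNm item).length = (pvNm best).length ∧ pvNm item ≤ pvNm best) from fun hc => hle hc.2)]
        refine ⟨by simp, ?_, ?_, ?_⟩
        · intro e he
          rcases List.mem_append.mp he with he | he
          · exact hlen e he
          · simp at he; subst he; exact heq
        · have : (x :: t ++ [item]).map pvNm = (pvNm x :: t.map pvNm) ++ [pvNm item] := by simp
          rw [this, pvMin_append, hmin']
          rw [min_eq_left (le_of_lt hlt)]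
        · rw [pvLast_append]
          rw [if_neg (show ¬((pvNm item == pvNm best) = true) from by simp only [beq_iff_eq]; exact ne_of_gt hlt)]
          exact hlast
    · rw [if_neg heq, if_neg (show ¬((pvNm item).length = (pvNm best).length ∧ pvNm item ≤ pvNm best) from fun hc => heq hc.1)]
      exact ⟨hne, hlen, hmin, hlast⟩

theorem pvInv_foldl (table : List (List String)) :
    ∀ (es : List (List String)) (best : List String), pvInv es best →
      pvInv (table.foldl pvStepA es) (table.foldl pvStepB best) := by
  induction table with
  | nil => intro es best h; exact h
  | cons item rest ih =>
    intro es best h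
    exact ih _ _ (pvInv_step es best item h)

theorem pvNames_eq_map (es : List (List String)) :
    es.foldl (fun acc item => acc ++ [PySem.List.pyGetD item 1 ""]) [] = es.map pvNm := by
  rw [PySem.List.foldl_append_singleton_eq_map]
  rfl

-- ===== VERDICT (by name: the statement is the Claim_ definition above) =====
theorem get_longest_name_id_spec : Claim_equal_get_longest_name_id := by
  intro table _ _
  unfold Spec_get_longest_name_id get_longest_name_id get_longest_name_id_alt
  have h0 : pvInv [["id", "a"]] ["id", "a"] := by
    refine ⟨by simp, ?_, ?_, ?_⟩
    · intro e he; simp at he; subst he; rfl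
    · decide
    · decide
  have h := pvInv_foldl table [["id", "a"]] ["id", "a"] h0
  set es := table.foldl pvStepA [["id", "a"]] with hes
  set best := table.foldl pvStepB ["id", "a"] with hbest
  obtain ⟨_, _, hmin, hlast⟩ := h
  have hstepA : (fun es item =>
      if (PySem.List.pyGetD item 1 "").length > (PySem.List.pyGetD (PySem.List.pyGetD es 0 []) 1 "").length then [item]
      else if (PySem.List.pyGetD item 1 "").length = (PySem.List.pyGetD (PySem.List.pyGetD es 0 []) 1 "").length then es ++ [item]
      else es) = pvStepA := by
    funext es item; rfl
  have hstepB : (fun best item =>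
      let name := PySem.List.pyGetD item 1 ""
      if name.length > (PySem.List.pyGetD best 1 "").length then item
      else if name.length = (PySem.List.pyGetD best 1 "").length ∧ name ≤ PySem.List.pyGetD best 1 "" then item
      else best) = pvStepB := by
    funext best item; rfl
  rw [hstepA, hstepB, ← hes, ← hbest]
  simp only [pvNames_eq_map, hmin, Option.getD_some]
  show (pvLast es (pvNm best)).getD "" = pvId best
  rw [hlast]
  rfl
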